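-- pv_equiv track=rewrite | github.com/chieh-eric/LeetCode | 0793-swap-adjacent-in-lr-string/0793-swap-adjacent-in-lr-string.py | canTransform
-- ===== SOURCE A (Python) =====
-- def canTransform(start, result):
--     """
--     :type start: str
--     :type result: str
--     :rtype: bool
--     """
--     # R  LR R L
--     #  RL  RRL
--     # FOR X and R, move x to left, for X and L, move x to right
--
--     origin = []
--     new = []
--
--     for i, st in enumerate(start):
--         if st != "X":
--             origin.append((i,st))
--
--     for i, st in enumerate(result):
--         if st != "X":
--             new.append((i,st))
--
--     if len(origin) != len(new):
--         return False
--
--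
--
--     for i in range(len(origin)):
--         if origin[i][1] != new[i][1]:
--             return False
--
--         origin_index = origin[i][0]
--         new_index = new[i][0]
--
--         if origin[i][1] == "R" and origin_index > new_index:
--             return False
--
--         if origin[i][1] == "L" and origin_index < new_index:
--             return False
--     return True
-- ===== SOURCE B (Python) =====
-- def canTransform(start, result):
--     i = j = 0
--     n, m = len(start), len(result)
--     while True:
--         while i < n and start[i] == 'X':
--             i += 1
--         while j < m and result[j] == 'X':
--             j += 1
--         if i == n or j == m:
--             return i == n and j == m
--         a, b = start[i], result[j]
--         if a != b:
--             return False
--         if a == 'R' and i > j: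
--             return False
--         if a == 'L' and i < j:
--             return False
--         i += 1
--         j += 1
-- ===== Notes on version B (the rewrite author's own statement) =====
-- stated objective: simpler
-- what changed: Replaced A's building of two filtered (index,char) lists plus an indexed comparison loop by a single two-pointer scan that skips 'X' in both strings in place and compares on the fly.
import Mathlib
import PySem

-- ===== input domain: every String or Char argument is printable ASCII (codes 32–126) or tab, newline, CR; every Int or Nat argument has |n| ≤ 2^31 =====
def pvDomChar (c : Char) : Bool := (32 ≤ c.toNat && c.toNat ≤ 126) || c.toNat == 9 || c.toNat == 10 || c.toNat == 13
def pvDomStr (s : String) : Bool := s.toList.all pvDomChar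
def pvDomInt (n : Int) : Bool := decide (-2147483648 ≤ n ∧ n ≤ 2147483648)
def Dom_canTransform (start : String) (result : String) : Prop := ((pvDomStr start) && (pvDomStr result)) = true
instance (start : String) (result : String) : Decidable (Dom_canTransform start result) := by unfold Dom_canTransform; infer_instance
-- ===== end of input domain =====

-- B replaces A's two filtered (index,char) lists and indexed comparison loop by a
-- two-pointer scan over the strings themselves (simpler: no intermediate lists).

-- ===== PORT A =====
-- the final "for i in range(len(origin))" loop of A, with its early returns
def canTransformLoop (origin new : List (Int × Char)) (i : Nat) : Bool :=
  if h : i < origin.length then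
    match new[i]? with
    | none => false   -- unreachable: A only runs the loop after checking the lengths are equal
    | some nv =>
      if origin[i].2 ≠ nv.2 then false
      else if origin[i].2 = 'R' ∧ origin[i].1 > nv.1 then false
      else if origin[i].2 = 'L' ∧ origin[i].1 < nv.1 then false
      else canTransformLoop origin new (i + 1)
  else true
termination_by origin.length - i

def canTransform (start : String) (result : String) : Bool :=
  let origin := (PySem.List.enumerate start.toList).filter (fun p => p.2 != 'X')
  let new := (PySem.List.enumerate result.toList).filter (fun p => p.2 != 'X')
  if origin.length ≠ new.length then false
  else canTransformLoop origin new 0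

-- ===== PORT B =====
-- two-pointer scan: skip 'X' on either side, compare the next non-'X' chars and positions
def bGo : List Char → Int → List Char → Int → Bool
  | x :: xs, i, ys, j =>
    if x = 'X' then bGo xs (i + 1) ys j
    else match ys with
      | y :: ys' =>
        if y = 'X' then bGo (x :: xs) i ys' (j + 1)
        else if x ≠ y then false
        else if x = 'R' ∧ i > j then false
        else if x = 'L' ∧ i < j then false
        else bGo xs (i + 1) ys' (j + 1)
      | [] => false
  | [], i, y :: ys', j => if y = 'X' then bGo [] i ys' (j + 1) else false
  | [], _, [], _ => true
termination_by xs _ ys _ => xs.length + ys.length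

def canTransform_alt (start : String) (result : String) : Bool :=
  bGo start.toList 0 result.toList 0

-- ===== PRECONDITION & SPEC =====
def Spec_canTransform (start : String) (result : String) (out : Bool) : Prop := out = canTransform_alt start result
instance (start : String) (result : String) (out : Bool) : Decidable (Spec_canTransform start result out) := by unfold Spec_canTransform; infer_instance

-- ===== CLAIM (what is proved, stated in full; the proofs are below) =====
def Claim_equal_canTransform : Prop := ∀ (start : String) (result : String), Dom_canTransform start result → Spec_canTransform start result (canTransform start result)

-- ===== LEMMAS AND PROOFS =====

-- the filtered enumeration both programs conceptually work on
def filt : List Char → Int → List (Int × Char)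
  | [], _ => []
  | x :: xs, i => if x = 'X' then filt xs (i + 1) else (i, x) :: filt xs (i + 1)

-- the pairwise comparison both programs conceptually perform
def pairCheck : List (Int × Char) → List (Int × Char) → Bool
  | [], [] => true
  | [], _ :: _ => false
  | _ :: _, [] => false
  | o :: os, n :: ns =>
    if o.2 ≠ n.2 then false
    else if o.2 = 'R' ∧ o.1 > n.1 then false
    else if o.2 = 'L' ∧ o.1 < n.1 then false
    else pairCheck os ns

theorem filter_enumerate_eq_filt (xs : List Char) (i : Int) :
    (PySem.List.enumerate xs i).filter (fun p => p.2 != 'X') = filt xs i := by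
  induction xs generalizing i with
  | nil => simp [PySem.List.enumerate_nil, filt]
  | cons x xs ih =>
    simp only [PySem.List.enumerate_cons, List.filter_cons, filt]
    by_cases h : x = 'X' <;> simp [h, ih]

theorem pairCheck_ne_length (l1 l2 : List (Int × Char)) (h : l1.length ≠ l2.length) :
    pairCheck l1 l2 = false := by
  induction l1 generalizing l2 with
  | nil => cases l2 with
    | nil => simp at h
    | cons n ns => simp [pairCheck]
  | cons o os ih =>
    cases l2 with
    | nil => simp [pairCheck]
    | cons n ns =>
      simp only [pairCheck]
      split_ifs <;> first | rfl | (exact ih ns (by simpa using h))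

theorem loop_eq_pairCheck (origin new : List (Int × Char)) (i : Nat)
    (hlen : origin.length = new.length) :
    canTransformLoop origin new i = pairCheck (origin.drop i) (new.drop i) := by
  by_cases h : i < origin.length
  · have h2 : i < new.length := hlen ▸ h
    rw [canTransformLoop]
    simp only [h, dif_pos, List.getElem?_eq_getElem h2]
    rw [List.drop_eq_getElem_cons h, List.drop_eq_getElem_cons h2]
    simp only [pairCheck]
    split_ifs <;> first | rfl | exact loop_eq_pairCheck origin new (i + 1) hlen
  · rw [canTransformLoop]
    simp only [h, dif_neg, not_false_iff]
    rw [List.drop_eq_nil_of_le (by omega), List.drop_eq_nil_of_le (by omega)]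
    rfl
termination_by origin.length - i

theorem bGo_eq_pairCheck_fuel (n : Nat) : ∀ (xs : List Char) (i : Int) (ys : List Char) (j : Int),
    xs.length + ys.length ≤ n → bGo xs i ys j = pairCheck (filt xs i) (filt ys j) := by
  induction n with
  | zero =>
    intro xs i ys j h
    have hx : xs = [] := by cases xs <;> simp_all
    have hy : ys = [] := by cases ys <;> simp_all
    subst hx; subst hy
    simp [bGo, filt, pairCheck]
  | succ n ih =>
    intro xs i ys j h
    cases xs with
    | nil =>
      cases ys with
      | nil => simp [bGo, filt, pairCheck]
      | cons y ys' =>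
        by_cases hy : y = 'X'
        · rw [bGo]
          simp only [hy, if_pos]
          rw [ih [] i ys' (j + 1) (by simp at h ⊢; omega)]
          simp [filt]
        · rw [bGo]
          simp [hy, filt, pairCheck]
    | cons x xs' =>
      cases ys with
      | nil =>
        by_cases hx : x = 'X'
        · rw [bGo, if_pos hx]
          rw [ih xs' (i + 1) [] j (by simp at h ⊢; omega)]
          simp [filt, hx]
        · rw [bGo, if_neg hx]
          simp [hx, filt, pairCheck]
      | cons y ys' =>
        by_cases hx : x = 'X'
        · rw [bGo, if_pos hx]
          rw [ih xs' (i + 1) (y :: ys') j (by simp at h ⊢; omega)]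
          simp [filt, hx]
        · by_cases hy : y = 'X'
          · rw [bGo, if_neg hx, if_pos hy]
            rw [ih (x :: xs') i ys' (j + 1) (by simp at h ⊢; omega)]
            simp [filt, hx, hy]
          · rw [bGo, if_neg hx]
            conv_rhs => rw [filt, filt]
            rw [if_neg hx, if_neg hy]
            simp only [hy, if_neg, not_false_iff, pairCheck]
            split_ifs with h1 h2 h3
            · rfl
            · rfl
            · rfl
            · exact ih xs' (i + 1) ys' (j + 1) (by simp at h ⊢; omega)

theorem bGo_eq_pairCheck (xs : List Char) (i : Int) (ys : List Char) (j : Int) :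
    bGo xs i ys j = pairCheck (filt xs i) (filt ys j) :=
  bGo_eq_pairCheck_fuel (xs.length + ys.length) xs i ys j (le_refl _)

-- ===== VERDICT (by name: the statement is the Claim_ definition above) =====
theorem canTransform_spec : Claim_equal_canTransform := by
  intro start result _
  unfold Spec_canTransform canTransform canTransform_alt
  simp only [filter_enumerate_eq_filt]
  rw [bGo_eq_pairCheck]
  by_cases h : (filt start.toList 0).length = (filt result.toList 0).length
  · simp only [ne_eq, h, not_true_eq_false, if_neg, not_false_iff]
    rw [loop_eq_pairCheck _ _ 0 h]
    simp
  · simp [h, pairCheck_ne_length _ _ h]
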